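-- pv_equiv track=rewrite | github.com/nirvanesque/livnium.core | arch-archive/experiments/NLI-ALL/nli_v5/training/train_geometry_first.py | create_synthetic_examples
-- ===== SOURCE A (Python) =====
-- from typing import List, Dict
--
-- def create_synthetic_examples(count: int = 100) -> List[Dict]:
--     """Create synthetic examples for demonstration."""
--     examples = []
--
--     # Simple synthetic examples
--     synthetic = [
--         # Entailment examples
--         ("A cat runs", "A cat is running", "entailment"),
--         ("A dog barks", "A dog makes noise", "entailment"),
--         ("A man walks", "A person moves", "entailment"),
--
--         # Contradiction examples
--         ("A cat runs", "A cat sleeps", "contradiction"),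
--         ("A dog barks", "A dog is silent", "contradiction"),
--         ("A man walks", "A man sits", "contradiction"),
--
--         # Neutral examples
--         ("A cat runs", "A dog barks", "neutral"),
--         ("A man walks", "The weather is nice", "neutral"),
--         ("A bird flies", "A car drives", "neutral"),
--     ]
--
--     # Repeat to reach count
--     for i in range(count):
--         premise, hypothesis, label = synthetic[i % len(synthetic)]
--         examples.append({
--             'premise': premise,
--             'hypothesis': hypothesis,
--             'label': label
--         })
--
--     return examples
-- ===== SOURCE B (Python) =====
-- def create_synthetic_examples(count: int = 100):
--     """Create synthetic examples for demonstration."""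
--     synthetic = [
--         ("A cat runs", "A cat is running", "entailment"),
--         ("A dog barks", "A dog makes noise", "entailment"),
--         ("A man walks", "A person moves", "entailment"),
--         ("A cat runs", "A cat sleeps", "contradiction"),
--         ("A dog barks", "A dog is silent", "contradiction"),
--         ("A man walks", "A man sits", "contradiction"),
--         ("A cat runs", "A dog barks", "neutral"),
--         ("A man walks", "The weather is nice", "neutral"),
--         ("A bird flies", "A car drives", "neutral"),
--     ]
--     # dictify the template once, then emit whole blocks of it until the counter runs out
--     base = [{'premise': p, 'hypothesis': h, 'label': l} for (p, h, l) in synthetic]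
--     examples = []
--     remaining = max(0, count)
--     while remaining > 0:
--         block = base[:remaining]          # a full template block, or the final partial one
--         examples.extend(block)
--         remaining -= len(block)
--     return examples
-- ===== Notes on version B (the rewrite author's own statement) =====
-- stated objective: faster
-- what changed: Replaces the per-item modulo-indexed range loop by dictifying the template list once and then a block-emitting while-loop that extends the output with whole (or final partial) slices of that base block until a remaining counter reaches zero.
import Mathlib
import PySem

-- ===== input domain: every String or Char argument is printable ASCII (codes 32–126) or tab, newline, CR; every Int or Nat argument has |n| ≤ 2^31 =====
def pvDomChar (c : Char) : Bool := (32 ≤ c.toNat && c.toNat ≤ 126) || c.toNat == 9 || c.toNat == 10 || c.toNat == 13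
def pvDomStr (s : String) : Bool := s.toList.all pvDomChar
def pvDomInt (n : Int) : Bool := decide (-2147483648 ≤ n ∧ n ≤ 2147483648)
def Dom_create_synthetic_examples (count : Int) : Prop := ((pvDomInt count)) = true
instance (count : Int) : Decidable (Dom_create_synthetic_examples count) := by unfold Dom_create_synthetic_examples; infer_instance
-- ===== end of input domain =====

-- B dictifies the template once and emits whole (or final partial) blocks of it in a
-- countdown while-loop instead of A's per-item modulo-indexed range loop (objective: faster).

-- ===== PORT A =====
-- the `synthetic` template list (shared literal of both Pythons)
def pvSynthetic : List (String × String × String) :=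
  [("A cat runs", "A cat is running", "entailment"),
   ("A dog barks", "A dog makes noise", "entailment"),
   ("A man walks", "A person moves", "entailment"),
   ("A cat runs", "A cat sleeps", "contradiction"),
   ("A dog barks", "A dog is silent", "contradiction"),
   ("A man walks", "A man sits", "contradiction"),
   ("A cat runs", "A dog barks", "neutral"),
   ("A man walks", "The weather is nice", "neutral"),
   ("A bird flies", "A car drives", "neutral")]

-- for i in range(count): premise,hypothesis,label = synthetic[i % len(synthetic)]; examples.append({...})
-- (the `none` branch of pyGet? is unreachable: 0 ≤ i % 9 < 9, so Python never raises here)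
def create_synthetic_examples (count : Int) : List (List (String × String)) :=
  (PySem.List.pyRange 0 count 1).foldl (fun examples i =>
    match PySem.List.pyGet? pvSynthetic (PySem.Int.mod i (pvSynthetic.length : Int)) with
    | some (premise, hypothesis, label) =>
        examples ++ [[("premise", premise), ("hypothesis", hypothesis), ("label", label)]]
    | none => examples) []

-- ===== PORT B =====
-- base = [{'premise': p, 'hypothesis': h, 'label': l} for (p, h, l) in synthetic]
def pvBase : List (List (String × String)) :=
  pvSynthetic.map (fun t => [("premise", t.1), ("hypothesis", t.2.1), ("label", t.2.2)])

-- the while-loop of Source B: block = base[:remaining]; examples.extend(block); remaining -= len(block)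
-- (`remaining` is max(0,count) ≥ 0, so the slice [:remaining] is exactly `take`)
def pvLoopB (remaining : Nat) (examples : List (List (String × String))) :
    List (List (String × String)) :=
  if _h : 0 < remaining then
    pvLoopB (remaining - (pvBase.take remaining).length) (examples ++ pvBase.take remaining)
  else examples
termination_by remaining
decreasing_by
  simp only [List.length_take]
  have hb : pvBase.length = 9 := rfl
  omega

def create_synthetic_examples_alt (count : Int) : List (List (String × String)) :=
  pvLoopB (max 0 count).toNat []

-- ===== PRECONDITION & SPEC =====
def Spec_create_synthetic_examples (count : Int) (out : List (List (String × String))) : Prop := out = create_synthetic_examples_alt count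
instance (count : Int) (out : List (List (String × String))) : Decidable (Spec_create_synthetic_examples count out) := by unfold Spec_create_synthetic_examples; infer_instance

-- ===== CLAIM (what is proved, stated in full; the proofs are below) =====
def Claim_equal_create_synthetic_examples : Prop := ∀ (count : Int), Dom_create_synthetic_examples count → Spec_create_synthetic_examples count (create_synthetic_examples count)

-- ===== LEMMAS AND PROOFS =====

def pvMk (t : String × String × String) : List (String × String) :=
  [("premise", t.1), ("hypothesis", t.2.1), ("label", t.2.2)]

def pvD : String × String × String := ("", "", "")

-- A's loop body, closed form over any list of nonnegative indices
theorem pv_foldl_closed (l : List Int) (acc : List (List (String × String)))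
    (h : ∀ i ∈ l, 0 ≤ i) :
    l.foldl (fun examples i =>
      match PySem.List.pyGet? pvSynthetic (PySem.Int.mod i (pvSynthetic.length : Int)) with
      | some (premise, hypothesis, label) =>
          examples ++ [[("premise", premise), ("hypothesis", hypothesis), ("label", label)]]
      | none => examples) acc
    = acc ++ l.map (fun i => pvMk (pvSynthetic.getD (PySem.Int.mod i 9).toNat pvD)) := by
  induction l generalizing acc with
  | nil => simp
  | cons a t ih =>
    have ha : 0 ≤ a := h a (by simp)
    have hlen : (pvSynthetic.length : Int) = 9 := by decide
    have hmod : PySem.Int.mod a 9 = a % 9 := PySem.Int.mod_eq_emod_of_pos (by omega)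
    have h0 : 0 ≤ a % 9 := Int.emod_nonneg a (by omega)
    have h9 : a % 9 < 9 := Int.emod_lt_of_pos a (by omega)
    have hget : PySem.List.pyGet? pvSynthetic (PySem.Int.mod a (pvSynthetic.length : Int))
        = some (pvSynthetic.getD (PySem.Int.mod a 9).toNat pvD) := by
      have hj' : PySem.Int.mod a (pvSynthetic.length : Int) = (((a % 9).toNat : Nat) : Int) := by
        rw [hlen, hmod]; omega
      have hjr : (PySem.Int.mod a 9).toNat = (a % 9).toNat := by rw [hmod]
      rw [hj', PySem.List.pyGet?_natCast, hjr,
        List.getElem?_eq_getElem (by show _ < 9; omega),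
        List.getD_eq_getElem _ _ (by show _ < 9; omega)]
    simp only [List.foldl_cons, hget, List.map_cons]
    rw [ih _ (fun i hi => h i (by simp [hi]))]
    simp [pvMk]

-- pvBase is the template dictified elementwise
theorem pvBase_eq_map : pvBase = pvSynthetic.map pvMk := rfl

-- B's loop, closed form: starting from `m` remaining, it emits the first m items of the
-- cyclic template sequence
theorem pvLoopB_closed (m : Nat) : ∀ examples,
    pvLoopB m examples
    = examples ++ (List.range m).map (fun k => pvMk (pvSynthetic.getD (k % 9) pvD)) := by
  induction m using Nat.strong_induction_on with
  | _ m ih =>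
    intro examples
    by_cases hm : 0 < m
    · rw [pvLoopB, dif_pos hm]
      have hb : pvBase.length = 9 := rfl
      by_cases h9 : m ≤ 9
      · -- final (possibly partial) block: take m covers everything, counter hits zero
        have hlen : (pvBase.take m).length = m := by
          simp only [List.length_take]; omega
        rw [hlen, Nat.sub_self, pvLoopB, dif_neg (by omega)]
        congr 1
        apply List.ext_getElem
        · simp only [List.length_take, List.length_map, List.length_range]; omega
        · intro i h1 h2
          have hi : i < m := by simpa using h2
          have hi9 : i < 9 := by omega
          simp only [List.getElem_take, pvBase_eq_map, List.getElem_map, List.getElem_range]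
          rw [Nat.mod_eq_of_lt hi9, List.getD_eq_getElem _ _ (by show i < 9; omega)]
      · -- a full block of 9, then recurse on m - 9
        have h9' : 9 ≤ m := by omega
        have htake : pvBase.take m = pvBase :=
          List.take_of_length_le (by omega)
        have hlen : (pvBase.take m).length = 9 := by rw [htake, hb]
        rw [hlen, htake, ih (m - 9) (by omega)]
        have hsplit : List.range m = List.range 9 ++ (List.range (m - 9)).map (9 + ·) := by
          rw [← List.range_add]
          congr 1
          omega
        rw [hsplit, List.map_append, List.map_map, ← List.append_assoc]
        have hfirst : (List.range 9).map (fun k => pvMk (pvSynthetic.getD (k % 9) pvD))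
            = pvBase := by decide
        have hsecond : (List.range (m - 9)).map
              ((fun k => pvMk (pvSynthetic.getD (k % 9) pvD)) ∘ (fun x => 9 + x))
            = (List.range (m - 9)).map (fun k => pvMk (pvSynthetic.getD (k % 9) pvD)) := by
          apply List.map_congr_left
          intro k _
          simp only [Function.comp]
          have he : (9 + k) % 9 = k % 9 := by omega
          rw [he]
        rw [hfirst, hsecond]
    · rw [pvLoopB, dif_neg hm]
      have : m = 0 := by omega
      subst this
      simp

theorem pv_main (count : Int) :
    create_synthetic_examples count = create_synthetic_examples_alt count := by
  have hA : create_synthetic_examples count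
      = (List.range count.toNat).map (fun k => pvMk (pvSynthetic.getD (k % 9) pvD)) := by
    by_cases hc : count ≤ 0
    · have : count.toNat = 0 := by omega
      simp [create_synthetic_examples, PySem.List.pyRange_one_eq_nil hc, this]
    · rw [not_le] at hc
      rw [create_synthetic_examples,
        pv_foldl_closed _ _ (fun i hi => by
          have := (PySem.List.mem_pyRange_one).1 hi; omega),
        PySem.List.pyRange_one]
      simp only [List.nil_append, List.map_map, sub_zero]
      apply List.map_congr_left
      intro k _
      simp only [Function.comp, zero_add]
      have hmod : PySem.Int.mod (k : Int) 9 = (k : Int) % 9 :=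
        PySem.Int.mod_eq_emod_of_pos (by omega)
      rw [hmod, show (((k : Int)) % 9).toNat = k % 9 from by omega]
  have hB : create_synthetic_examples_alt count
      = (List.range count.toNat).map (fun k => pvMk (pvSynthetic.getD (k % 9) pvD)) := by
    have hm : (max 0 count).toNat = count.toNat := by omega
    rw [create_synthetic_examples_alt, hm, pvLoopB_closed]
    simp
  rw [hA, hB]

-- ===== VERDICT (by name: the statement is the Claim_ definition above) =====
theorem create_synthetic_examples_spec : Claim_equal_create_synthetic_examples := by
  intro count _
  exact pv_main count
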